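-- pv_equiv track=rewrite | github.com/dynaconf/dynaconf | dynaconf/vendor/jinja2/filters.py | sync_do_slice
-- ===== SOURCE A (Python) =====
-- _A=None
--
-- def sync_do_slice(value,slices,fill_with=_A):
-- 	D=fill_with;B=slices;E=list(value);F=len(E);G=F//B;H=F%B;C=0
-- 	for A in range(B):
-- 		J=C+A*G
-- 		if A<H:C+=1
-- 		K=C+(A+1)*G;I=E[J:K]
-- 		if D is not _A and A>=H:I.append(D)
-- 		yield I
-- ===== SOURCE B (Python) =====
-- def sync_do_slice(value, slices, fill_with=None):
--     seq = list(value)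
--     per, extra = divmod(len(seq), slices)
--     it = iter(seq)
--     for i in range(slices):
--         chunk = [next(it) for _ in range(per + (i < extra))]
--         if fill_with is not None and i >= extra:
--             chunk.append(fill_with)
--         yield chunk
-- ===== Notes on version B (the rewrite author's own statement) =====
-- stated objective: alternative
-- what changed: B threads a single iterator through the loop and builds each chunk by consuming per+(i<extra) elements one at a time from it, so there is no index/offset arithmetic and no slicing at all, unlike A's offset accumulator and E[J:K] bound reconstruction.
import Mathlib
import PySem

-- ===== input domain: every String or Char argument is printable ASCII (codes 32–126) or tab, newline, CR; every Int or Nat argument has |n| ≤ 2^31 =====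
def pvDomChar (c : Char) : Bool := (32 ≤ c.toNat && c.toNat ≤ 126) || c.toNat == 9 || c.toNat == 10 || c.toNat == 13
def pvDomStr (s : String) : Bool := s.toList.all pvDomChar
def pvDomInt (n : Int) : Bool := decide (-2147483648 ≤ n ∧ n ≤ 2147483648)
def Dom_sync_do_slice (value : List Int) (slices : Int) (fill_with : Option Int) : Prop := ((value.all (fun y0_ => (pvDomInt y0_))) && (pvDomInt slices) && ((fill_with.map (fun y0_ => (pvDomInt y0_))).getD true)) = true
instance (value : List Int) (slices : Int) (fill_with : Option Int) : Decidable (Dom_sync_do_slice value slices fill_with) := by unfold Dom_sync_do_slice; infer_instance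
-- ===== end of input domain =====

-- B threads the elements through a single consumed iterator (take/drop off the remaining
-- list) instead of A's offset accumulator and computed slice bounds; objective: alternative.
-- A and B are Python generators; equivalence is about the list of yielded values.


-- ===== PORT A =====
-- literal transliteration of A: offset C, start J = C + A*G, end K = C' + (A+1)*G, slice E[J:K]
def sync_do_slice (value : List Int) (slices : Int) (fill_with : Option Int) : List (List Int) :=
  let E := value
  let F : Int := E.length
  let G := PySem.Int.floordiv F slices
  let H := PySem.Int.mod F slices
  ((PySem.List.pyRange 0 slices 1).foldl
    (fun (st : Int × List (List Int)) A =>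
      let C := st.1
      let J := C + A * G
      let C := if A < H then C + 1 else C
      let K := C + (A + 1) * G
      let I := PySem.List.slice E (some J) (some K)
      let I := match fill_with with
        | some d => if A ≥ H then I ++ [d] else I
        | none => I
      (C, st.2 ++ [I]))
    (0, [])).2

-- ===== PORT B =====
-- literal transliteration of B: an iterator over seq is modelled by the not-yet-consumed
-- suffix of the list; '[next(it) for _ in range(size)]' takes 'size' elements off its front.
def sync_do_slice_alt (value : List Int) (slices : Int) (fill_with : Option Int) : List (List Int) :=
  let per := PySem.Int.floordiv (value.length : Int) slices
  let extra := PySem.Int.mod (value.length : Int) slices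
  ((PySem.List.pyRange 0 slices 1).foldl
    (fun (st : List Int × List (List Int)) i =>
      let size := per + (if i < extra then 1 else 0)
      let chunk := st.1.take size.toNat
      let rest := st.1.drop size.toNat
      let chunk := match fill_with with
        | some d => if i ≥ extra then chunk ++ [d] else chunk
        | none => chunk
      (rest, st.2 ++ [chunk]))
    (value, [])).2

-- ===== PRECONDITION & SPEC =====
-- Pre_ excludes exactly slices = 0, where Python's len(value)//slices raises ZeroDivisionError.
def Pre_sync_do_slice (_value : List Int) (slices : Int) (_fill_with : Option Int) : Prop :=
  slices ≠ 0
instance (value : List Int) (slices : Int) (fill_with : Option Int) : Decidable (Pre_sync_do_slice value slices fill_with) := by unfold Pre_sync_do_slice; infer_instance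
def pvWitness_sync_do_slice : List Int × Int × Option Int := ([1, 2, 3, 4, 5], 3, some 9)

def Spec_sync_do_slice (value : List Int) (slices : Int) (fill_with : Option Int) (out : List (List Int)) : Prop := out = sync_do_slice_alt value slices fill_with
instance (value : List Int) (slices : Int) (fill_with : Option Int) (out : List (List Int)) : Decidable (Spec_sync_do_slice value slices fill_with out) := by unfold Spec_sync_do_slice; infer_instance

-- ===== CLAIM (what is proved, stated in full; the proofs are below) =====
def Claim_equal_sync_do_slice : Prop := ∀ (value : List Int) (slices : Int) (fill_with : Option Int), Dom_sync_do_slice value slices fill_with → Pre_sync_do_slice value slices fill_with → Spec_sync_do_slice value slices fill_with (sync_do_slice value slices fill_with)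

-- ===== LEMMAS AND PROOFS =====

-- the loop bodies, named for the proofs
def pvStepA (E : List Int) (fill_with : Option Int) (G H : Int) :
    Int × List (List Int) → Int → Int × List (List Int) :=
  fun st A =>
    let C := st.1
    let J := C + A * G
    let C := if A < H then C + 1 else C
    let K := C + (A + 1) * G
    let I := PySem.List.slice E (some J) (some K)
    let I := match fill_with with
      | some d => if A ≥ H then I ++ [d] else I
      | none => I
    (C, st.2 ++ [I])

def pvStepB (fill_with : Option Int) (per extra : Int) :
    List Int × List (List Int) → Int → List Int × List (List Int) :=
  fun st i =>
    let size := per + (if i < extra then 1 else 0)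
    let chunk := st.1.take size.toNat
    let rest := st.1.drop size.toNat
    let chunk := match fill_with with
      | some d => if i ≥ extra then chunk ++ [d] else chunk
      | none => chunk
    (rest, st.2 ++ [chunk])

theorem sync_do_slice_eq_fold (value : List Int) (slices : Int) (fill_with : Option Int) :
    sync_do_slice value slices fill_with =
      ((PySem.List.pyRange 0 slices 1).foldl
        (pvStepA value fill_with (PySem.Int.floordiv (value.length : Int) slices)
          (PySem.Int.mod (value.length : Int) slices)) (0, [])).2 := rfl

theorem sync_do_slice_alt_eq_fold (value : List Int) (slices : Int) (fill_with : Option Int) :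
    sync_do_slice_alt value slices fill_with =
      ((PySem.List.pyRange 0 slices 1).foldl
        (pvStepB fill_with (PySem.Int.floordiv (value.length : Int) slices)
          (PySem.Int.mod (value.length : Int) slices)) (value, [])).2 := rfl

-- the loop invariant for a positive number of slices
theorem pv_invariant (E : List Int) (fw : Option Int) (s : Int) (hs : 0 < s)
    (G H : Int) (hG : G = PySem.Int.floordiv (E.length : Int) s)
    (hH : H = PySem.Int.mod (E.length : Int) s) :
    ∀ (k : Nat), (k : Int) ≤ s →
      ((PySem.List.pyRange 0 k 1).foldl (pvStepA E fw G H) (0, [])).1 = min (k : Int) H ∧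
      ((PySem.List.pyRange 0 k 1).foldl (pvStepB fw G H) (E, [])).1 =
        E.drop (min (k : Int) H + k * G).toNat ∧
      ((PySem.List.pyRange 0 k 1).foldl (pvStepA E fw G H) (0, [])).2 =
        ((PySem.List.pyRange 0 k 1).foldl (pvStepB fw G H) (E, [])).2 := by
  have hH0 : 0 ≤ H := hH ▸ PySem.Int.mod_nonneg _ hs
  have hG0 : 0 ≤ G := by
    rw [hG, PySem.Int.floordiv_eq_ediv_of_pos hs]
    exact Int.ediv_nonneg (Int.natCast_nonneg _) (le_of_lt hs)
  intro k
  induction k with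
  | zero =>
      intro _
      rw [show (((0 : Nat) : Int)) = 0 by norm_num, PySem.List.pyRange_one_eq_nil le_rfl]
      refine ⟨by simp; omega, by simp [min_eq_left hH0], rfl⟩
  | succ k ih =>
      intro hk1
      have hk : (k : Int) ≤ s := by push_cast at hk1 ⊢; omega
      have hsplit : PySem.List.pyRange 0 (↑(k + 1)) 1 =
          PySem.List.pyRange 0 (↑k) 1 ++ [(k : Int)] := by
        have h := PySem.List.pyRange_one_succ_right (a := 0) (b := (k : Int)) (Int.natCast_nonneg k)
        push_cast at h ⊢
        exact h
      obtain ⟨ihA, ihB, ihOut⟩ := ih hk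
      rw [hsplit, List.foldl_append, List.foldl_append]
      generalize hgA : List.foldl (pvStepA E fw G H) (0, []) (PySem.List.pyRange 0 (↑k) 1) = stA at ihA ihOut ⊢
      generalize hgB : List.foldl (pvStepB fw G H) (E, []) (PySem.List.pyRange 0 (↑k) 1) = stB at ihB ihOut ⊢
      obtain ⟨CA, outA⟩ := stA
      obtain ⟨restB, outB⟩ := stB
      simp only at ihA ihB ihOut
      subst ihA ihB ihOut
      simp only [List.foldl_cons, List.foldl_nil, pvStepA, pvStepB]
      -- names for the current bounds
      set J : Int := min (k : Int) H + (k : Int) * G with hJ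
      have hJ0 : 0 ≤ J := by
        have : 0 ≤ (k : Int) * G := mul_nonneg (Int.natCast_nonneg k) hG0
        have : 0 ≤ min (k : Int) H := le_min (Int.natCast_nonneg k) hH0
        omega
      have hsize0 : 0 ≤ G + (if (k : Int) < H then 1 else 0) := by split_ifs <;> omega
      have hK : (if (k : Int) < H then min (k : Int) H + 1 else min (k : Int) H) + ((k : Int) + 1) * G
          = J + (G + (if (k : Int) < H then 1 else 0)) := by
        rw [hJ]; split_ifs <;> ring
      have hchunk :
          PySem.List.slice E (some J)
            (some ((if (k : Int) < H then min (k : Int) H + 1 else min (k : Int) H) + ((k : Int) + 1) * G)) =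
          (E.drop J.toNat).take (G + (if (k : Int) < H then 1 else 0)).toNat := by
        rw [hK, PySem.List.slice_toNat E hJ0 (by omega)]
        congr 1
        omega
      have hsize : G + (if (k : Int) < H then 1 else 0) = if (k : Int) < H then G + 1 else G := by
        split_ifs <;> ring
      refine ⟨?_, ?_, ?_⟩
      · push_cast
        split_ifs <;> omega
      · rw [List.drop_drop]
        congr 1
        push_cast
        split_ifs <;> simp only [min_def] at * <;> split_ifs at * <;> omega
      · congr 1
        by_cases hlt : (k : Int) < H
        · simp only [if_pos hlt, if_neg (show ¬ (k : Int) ≥ H by omega)] at hchunk ⊢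
          rw [hchunk]
        · simp only [if_neg hlt, if_pos (show (k : Int) ≥ H by omega)] at hchunk ⊢
          rw [hchunk]

-- ===== VERDICT (by name: the statement is the Claim_ definition above) =====
theorem sync_do_slice_spec : Claim_equal_sync_do_slice := by
  intro value slices fill_with _ hpre
  unfold Spec_sync_do_slice
  rw [sync_do_slice_eq_fold, sync_do_slice_alt_eq_fold]
  rcases lt_trichotomy slices 0 with hneg | hzero | hpos
  · rw [PySem.List.pyRange_one_eq_nil (by omega)]
    rfl
  · exact absurd hzero hpre
  · have hcast : ((slices.toNat : Nat) : Int) = slices := Int.toNat_of_nonneg (le_of_lt hpos)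
    have := (pv_invariant value fill_with slices hpos _ _ rfl rfl slices.toNat
      (by omega)).2.2
    rw [hcast] at this
    exact this
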